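-- pv_equiv track=rewrite | github.com/PaddlePaddle/PaddleOCR | ppocrvenv/lib/python3.7/site-packages/pandas/core/indexes/multi.py | sparsify_labels
-- ===== SOURCE A (Python) =====
-- def sparsify_labels(label_list, start: int = 0, sentinel=""):
--     pivoted = list(zip(*label_list))
--     k = len(label_list)
--
--     result = pivoted[: start + 1]
--     prev = pivoted[start]
--
--     for cur in pivoted[start + 1 :]:
--         sparse_cur = []
--
--         for i, (p, t) in enumerate(zip(prev, cur)):
--             if i == k - 1:
--                 sparse_cur.append(t)
--                 result.append(sparse_cur)
--                 break
--
--             if p == t: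
--                 sparse_cur.append(sentinel)
--             else:
--                 sparse_cur.extend(cur[i:])
--                 result.append(sparse_cur)
--                 break
--
--         prev = cur
--
--     return list(zip(*result))
-- ===== SOURCE B (Python) =====
-- def sparsify_labels(label_list, start=0, sentinel=""):
--     rows = list(zip(*label_list))
--     k = len(label_list)
--
--     result = list(rows[: start + 1])
--     prev = rows[start]
--
--     for cur in rows[start + 1 :]:
--         # length of the common prefix with the previous row, capped at k - 1
--         # (the last level is never blanked), then build the row in one go
--         j = 0
--         for p, t in zip(prev, cur):
--             if j == k - 1 or p != t:
--                 break
--             j += 1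
--         result.append([sentinel] * j + list(cur[j:]))
--         prev = cur
--
--     return list(zip(*result))
-- ===== Notes on version B (the rewrite author's own statement) =====
-- stated objective: simpler
-- what changed: B replaces A's inner loop of inline i==k-1/append/extend-and-break branches and its conditional append to result by two separated steps: count the common-prefix length j capped at k-1, then build the row as [sentinel]*j + cur[j:] and append it unconditionally.
import Mathlib
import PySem

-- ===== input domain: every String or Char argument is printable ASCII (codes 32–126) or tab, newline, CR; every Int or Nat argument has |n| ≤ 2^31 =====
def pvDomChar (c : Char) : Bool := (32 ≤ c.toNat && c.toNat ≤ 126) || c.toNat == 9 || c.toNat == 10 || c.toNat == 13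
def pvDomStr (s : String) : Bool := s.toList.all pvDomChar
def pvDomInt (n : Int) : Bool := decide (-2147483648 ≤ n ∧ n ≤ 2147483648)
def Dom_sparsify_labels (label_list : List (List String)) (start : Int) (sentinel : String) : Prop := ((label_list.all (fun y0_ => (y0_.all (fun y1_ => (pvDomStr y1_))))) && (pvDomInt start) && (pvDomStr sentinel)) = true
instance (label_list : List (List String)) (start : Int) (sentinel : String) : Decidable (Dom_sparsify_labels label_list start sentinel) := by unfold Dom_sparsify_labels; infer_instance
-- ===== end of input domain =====

-- B separates "find the common-prefix length, capped at k-1" from "build the row in one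
-- expression", replacing A's inner loop of inline i==k-1 / append / extend-and-break branches and
-- its conditional append to result (objective: simpler). Return-value equivalence; neither
-- program mutates its arguments.

-- shared helper: exact port of Python's zip(*xss) — rows truncated to the shortest level,
-- row i = [l[i] for l in xss]; zip() of no arguments is empty.
def zipStar (xss : List (List String)) : List (List String)  :=
  match xss.map List.length with
  | [] => []
  | n :: ns => (List.range (ns.foldl min n)).map (fun i => xss.map (fun l => l.getD i ""))

-- ===== PORT A =====
-- A's inner 'for i, (p, t) in enumerate(zip(prev, cur))' loop; 'some row' = one of the two
-- append-and-break branches fired, 'none' = the loop fell off the end without appending.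
def innerA (sentinel : String) (k : Int) (curFull : List String) :
    Nat → List String → List String → List String → Option (List String)
  | i, acc, p :: ps, t :: ts =>
    if (i : Int) = k - 1 then some (acc ++ [t])
    else if p = t then innerA sentinel k curFull (i + 1) (acc ++ [sentinel]) ps ts
    else some (acc ++ curFull.drop i)   -- cur[i:] with i : Nat is exactly drop i
  | _, _, _, _ => none

def stepA (sentinel : String) (k : Int) (st : List (List String) × List String)
    (cur : List String) : List (List String) × List String :=
  match innerA sentinel k cur 0 [] st.2 cur with
  | some row => (st.1 ++ [row], cur)
  | none => (st.1, cur)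

def sparsify_labels (label_list : List (List String)) (start : Int) (sentinel : String) :
    List (List String) :=
  let pivoted := zipStar label_list
  let k : Int := label_list.length
  let result := PySem.List.slice pivoted none (some (start + 1))
  match PySem.List.pyGet? pivoted start with
  | none => []   -- Python raises IndexError here; excluded by Pre_
  | some prev =>
    zipStar ((PySem.List.slice pivoted (some (start + 1)) none).foldl
      (stepA sentinel k) (result, prev)).1

-- ===== PORT B =====
-- B's inner loop: common-prefix length j, capped at k-1 by the 'j == k - 1 or p != t' break.
def cplB (km1 : Int) : Nat → List String → List String → Nat
  | j, p :: ps, t :: ts => if (j : Int) = km1 ∨ p ≠ t then j else cplB km1 (j + 1) ps ts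
  | j, _, _ => j

-- '[sentinel] * j + list(cur[j:])'
def rowB (k : Int) (sentinel : String) (prev cur : List String) : List String :=
  let j := cplB (k - 1) 0 prev cur
  List.replicate j sentinel ++ cur.drop j

def stepB (sentinel : String) (k : Int) (st : List (List String) × List String)
    (cur : List String) : List (List String) × List String :=
  (st.1 ++ [rowB k sentinel st.2 cur], cur)

def sparsify_labels_alt (label_list : List (List String)) (start : Int) (sentinel : String) :
    List (List String) :=
  let rows := zipStar label_list
  let k : Int := label_list.length
  let result := PySem.List.slice rows none (some (start + 1))
  match PySem.List.pyGet? rows start with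
  | none => []   -- Python raises IndexError here; excluded by Pre_
  | some prev =>
    zipStar ((PySem.List.slice rows (some (start + 1)) none).foldl
      (stepB sentinel k) (result, prev)).1

-- ===== PRECONDITION & SPEC =====
-- Exactly the inputs on which the Python A returns: rows = zip(*label_list) is non-empty and
-- rows[start] is a valid (possibly negative) Python index, i.e. -#rows ≤ start < #rows where
-- #rows is the length of the shortest level; otherwise A raises IndexError at pivoted[start].
def Pre_sparsify_labels (label_list : List (List String)) (start : Int) (sentinel : String) : Prop :=
  label_list ≠ [] ∧ ∀ l ∈ label_list, -(l.length : Int) ≤ start ∧ start < (l.length : Int)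

instance (label_list : List (List String)) (start : Int) (sentinel : String) :
    Decidable (Pre_sparsify_labels label_list start sentinel) := by
  unfold Pre_sparsify_labels; infer_instance

def pvWitness_sparsify_labels : List (List String) × Int × String :=
  ([["a", "a", "b"], ["x", "y", "y"]], 0, "")

def Spec_sparsify_labels (label_list : List (List String)) (start : Int) (sentinel : String) (out : List (List String)) : Prop := out = sparsify_labels_alt label_list start sentinel
instance (label_list : List (List String)) (start : Int) (sentinel : String) (out : List (List String)) : Decidable (Spec_sparsify_labels label_list start sentinel out) := by unfold Spec_sparsify_labels; infer_instance

-- ===== CLAIM (what is proved, stated in full; the proofs are below) =====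
def Claim_equal_sparsify_labels : Prop := ∀ (label_list : List (List String)) (start : Int) (sentinel : String), Dom_sparsify_labels label_list start sentinel → Pre_sparsify_labels label_list start sentinel → Spec_sparsify_labels label_list start sentinel (sparsify_labels label_list start sentinel)

-- ===== LEMMAS AND PROOFS =====

lemma cplB_ge (km1 : Int) : ∀ (j : Nat) (ps ts : List String), j ≤ cplB km1 j ps ts := by
  intro j ps ts
  induction ps generalizing j ts with
  | nil => simp [cplB]
  | cons p ps ih =>
    cases ts with
    | nil => simp [cplB]
    | cons t ts =>
      simp only [cplB]
      split
      · exact le_refl _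
      · exact le_trans (Nat.le_succ j) (ih (j + 1) ts)

-- the crux: A's break/append inner loop produces exactly B's "replicate the sentinel over the
-- capped common prefix, keep the tail" row
lemma innerA_eq (sentinel : String) (k : Int) (curFull : List String) :
    ∀ (ps ts : List String) (i : Nat) (acc : List String),
      ts = curFull.drop i → ps.length = ts.length → 1 ≤ ps.length → (i : Int) + ps.length = k →
      innerA sentinel k curFull i acc ps ts =
        some (acc ++ (List.replicate (cplB (k - 1) i ps ts - i) sentinel ++
          curFull.drop (cplB (k - 1) i ps ts))) := by
  intro ps
  induction ps with
  | nil => intro ts i acc _ _ h1 _; simp at h1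
  | cons p ps ih =>
    intro ts i acc hts hlen _ hk
    cases ts with
    | nil => simp at hlen
    | cons t ts =>
      simp only [List.length_cons] at hlen hk
      by_cases hi : (i : Int) = k - 1
      · have hps : ps.length = 0 := by omega
        have hts0 : ts = [] := by
          have := hlen; rw [List.length_eq_zero_iff.mp hps] at this
          exact List.length_eq_zero_iff.mp (by omega)
        rw [innerA, if_pos hi]
        have hcpl : cplB (k - 1) i (p :: ps) (t :: ts) = i := by
          rw [cplB, if_pos (Or.inl hi)]
        rw [hcpl, ← hts, hts0]
        simp
      · by_cases hpt : p = t
        · have hge := cplB_ge (k - 1) (i + 1) ps ts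
          have hts' : ts = curFull.drop (i + 1) := by
            have : (curFull.drop i).tail = curFull.drop (i + 1) := by
              rw [← List.drop_drop]; simp
            rw [← this, ← hts]
            rfl
          rw [innerA, if_neg hi, if_pos hpt,
            ih ts (i + 1) (acc ++ [sentinel]) hts' (by omega) (by omega) (by push_cast; omega)]
          have hc : cplB (k - 1) i (p :: ps) (t :: ts) = cplB (k - 1) (i + 1) ps ts := by
            rw [cplB, if_neg]; push Not; exact ⟨hi, hpt⟩
          rw [hc]
          congr 1
          have : cplB (k - 1) (i + 1) ps ts - i = (cplB (k - 1) (i + 1) ps ts - (i + 1)) + 1 := by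
            omega
          rw [this, List.replicate_succ]
          simp
        · rw [innerA, if_neg hi, if_neg hpt]
          have hc : cplB (k - 1) i (p :: ps) (t :: ts) = i := by
            rw [cplB, if_pos (Or.inr hpt)]
          rw [hc]
          simp

-- hence the two loop bodies agree step by step on rows of the common width kN ≥ 1
lemma fold_eq (sentinel : String) (k : Int) (kN : Nat) (hkN : (kN : Int) = k) (hk1 : 1 ≤ kN) :
    ∀ (rest : List (List String)) (prev : List String) (res : List (List String)),
      prev.length = kN → (∀ r ∈ rest, r.length = kN) →
      rest.foldl (stepA sentinel k) (res, prev) = rest.foldl (stepB sentinel k) (res, prev) := by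
  intro rest
  induction rest with
  | nil => intro prev res _ _; rfl
  | cons c cs ih =>
    intro prev res hprev hmem
    have hc : c.length = kN := hmem c (by simp)
    have hrow : innerA sentinel k c 0 [] prev c = some (rowB k sentinel prev c) := by
      have := innerA_eq sentinel k c prev c 0 []
        (by simp) (by rw [hprev, hc]) (by omega) (by rw [hprev]; push_cast; omega)
      simpa [rowB] using this
    simp only [List.foldl_cons]
    have hstep : stepA sentinel k (res, prev) c = stepB sentinel k (res, prev) c := by
      simp [stepA, stepB, hrow]
    rw [hstep]
    exact ih c (res ++ [rowB k sentinel prev c]) hc (fun r hr => hmem r (by simp [hr]))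

lemma zipStar_row_length (xss : List (List String)) :
    ∀ r ∈ zipStar xss, r.length = xss.length := by
  intro r hr
  unfold zipStar at hr
  cases h : xss.map List.length with
  | nil => rw [h] at hr; simp at hr
  | cons n ns =>
    rw [h] at hr
    simp only [List.mem_map] at hr
    obtain ⟨i, _, rfl⟩ := hr
    simp

-- ===== VERDICT (by name: the statement is the Claim_ definition above) =====
theorem sparsify_labels_spec : Claim_equal_sparsify_labels := by
  intro label_list start sentinel _ hpre
  unfold Spec_sparsify_labels sparsify_labels sparsify_labels_alt
  cases hget : PySem.List.pyGet? (zipStar label_list) start with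
  | none => simp only [hget]
  | some prev =>
    simp only [hget]
    have hprevmem : prev ∈ zipStar label_list :=
      PySem.List.mem_of_pyGet?_eq_some _ hget
    have hprev : prev.length = label_list.length :=
      zipStar_row_length label_list prev hprevmem
    have hk1 : 1 ≤ label_list.length := by
      cases label_list with
      | nil => exact absurd rfl hpre.1
      | cons _ _ => simp
    rw [fold_eq sentinel (label_list.length : Int) label_list.length rfl hk1 _ prev _ hprev
      (fun r hr => zipStar_row_length label_list r (PySem.List.mem_of_mem_slice _ _ _ hr))]
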